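-- pv_equiv track=rewrite | github.com/phatakshaunak/scaler_academy | DSA_Problem_Solving/Miscellaneous/decode_encode.py | decode_string
-- ===== SOURCE A (Python) =====
-- def decode_string(st):
--
--     st = list(st)
--
--     curr = ''
--     ans = ''
--     for char in st:
--
--         if curr == '' or curr[-1] == char:
--             curr = curr + char
--
--         else:
--             freq = len(curr)
--             offset = (ord(curr[-1]) - ord('A') + freq) % 26
--             new_char = chr(ord('A') + offset)
--             ans += new_char
--             if freq > 1:
--                 ans += str(freq)
--
--             curr = char
--
--     if curr:
--         freq = len(curr)
--         offset = (ord(curr[-1]) - ord('A') + freq) % 26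
--         new_char = chr(ord('A') + offset)
--         ans += new_char
--         if freq > 1:
--             ans += str(freq)
--
--     return ans
-- ===== SOURCE B (Python) =====
-- def decode_string(st):
--     parts = []
--     n = len(st)
--     i = 0
--     while i < n:
--         j = i + 1
--         while j < n and st[j] == st[i]:
--             j += 1
--         freq = j - i
--         parts.append(chr(ord('A') + (ord(st[i]) - ord('A') + freq) % 26))
--         if freq > 1:
--             parts.append(str(freq))
--         i = j
--     return ''.join(parts)
-- ===== Notes on version B (the rewrite author's own statement) =====
-- stated objective: idiomatic
-- what changed: Replaced A's fold that drags a growing run-accumulator string and a duplicated trailing-flush block by a two-pointer scan that measures each maximal run directly and emits its encoding in one uniform place, joining collected parts at the end.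
import Mathlib
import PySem

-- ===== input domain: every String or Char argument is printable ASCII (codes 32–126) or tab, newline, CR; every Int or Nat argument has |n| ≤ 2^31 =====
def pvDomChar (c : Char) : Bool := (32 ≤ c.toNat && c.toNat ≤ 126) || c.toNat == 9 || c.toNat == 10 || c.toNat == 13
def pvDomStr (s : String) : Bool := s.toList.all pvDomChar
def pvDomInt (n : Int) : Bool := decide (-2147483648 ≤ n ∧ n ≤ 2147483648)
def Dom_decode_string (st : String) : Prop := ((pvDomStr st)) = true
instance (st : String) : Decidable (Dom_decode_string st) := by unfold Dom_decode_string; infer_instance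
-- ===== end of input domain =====

-- B replaces A's run-accumulator fold and duplicated trailing flush by a two-pointer
-- run scan emitting each run's encoding in one place (objective: idiomatic).

-- ===== PORT A =====
-- the shared flush block of A: encode the finished run `curr`
def pieceA (curr : List Char) : List Char :=
  let freq : Int := curr.length
  let offset : Int := PySem.Int.mod (((curr.getLastD 'A').toNat : Int) - 65 + freq) 26
  let newChar : Char := Char.ofNat (65 + offset).toNat
  newChar :: (if freq > 1 then (PySem.Int.toStr freq).toList else [])

def stepA (s : List Char × List Char) (char : Char) : List Char × List Char :=
  if s.1 = [] ∨ s.1.getLastD 'A' = char then (s.1 ++ [char], s.2)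
  else ([char], s.2 ++ pieceA s.1)

def decode_string (st : String) : String :=
  let fs := st.toList.foldl stepA ([], [])
  String.mk (if fs.1 = [] then fs.2 else fs.2 ++ pieceA fs.1)

-- ===== PORT B =====
-- inner while loop of B: how many further chars continue the run of c
def countRun (c : Char) : List Char → Nat
  | [] => 0
  | x :: xs => if x = c then countRun c xs + 1 else 0

-- one emitted part for a run of `freq` copies of c
def pieceB (c : Char) (freq : Nat) : List Char :=
  let offset : Int := PySem.Int.mod ((c.toNat : Int) - 65 + (freq : Int)) 26
  Char.ofNat (65 + offset).toNat :: (if freq > 1 then (PySem.Int.toStr (freq : Int)).toList else [])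

-- outer while loop of B over run starts
def encodeRuns : List Char → List Char
  | [] => []
  | c :: rest =>
      let k := countRun c rest
      pieceB c (k + 1) ++ encodeRuns (rest.drop k)
termination_by l => l.length
decreasing_by
  simp only [List.length_cons, List.length_drop]
  omega

def decode_string_alt (st : String) : String := String.mk (encodeRuns st.toList)

-- ===== PRECONDITION & SPEC =====
def Spec_decode_string (st : String) (out : String) : Prop := out = decode_string_alt st
instance (st : String) (out : String) : Decidable (Spec_decode_string st out) := by unfold Spec_decode_string; infer_instance

-- ===== CLAIM (what is proved, stated in full; the proofs are below) =====
def Claim_equal_decode_string : Prop := ∀ (st : String), Dom_decode_string st → Spec_decode_string st (decode_string st)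

-- ===== LEMMAS AND PROOFS =====

theorem getLastD_replicate (c d : Char) (k : Nat) (hk : 1 ≤ k) :
    (List.replicate k c).getLast?.getD d = c := by
  rw [List.getLast?_replicate]
  cases k with
  | zero => omega
  | succ n => simp

-- proof-side view of B: processing with a pending run of k copies of c
def runB (c : Char) (k : Nat) : List Char → List Char
  | [] => pieceB c k
  | x :: xs => if x = c then runB c (k + 1) xs else pieceB c k ++ runB x 1 xs

theorem runB_eq (l : List Char) : ∀ (c : Char) (k : Nat),
    runB c k l = pieceB c (k + countRun c l) ++ encodeRuns (l.drop (countRun c l)) := by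
  induction l with
  | nil => intro c k; simp [runB, countRun, encodeRuns]
  | cons x xs ih =>
    intro c k
    by_cases h : x = c
    · subst h
      simp [runB, countRun, ih x (k + 1)]
      ring_nf
    · simp [runB, countRun, h, ih x 1, encodeRuns, Nat.add_comm]

theorem pieceA_replicate (c : Char) (k : Nat) (hk : 1 ≤ k) :
    pieceA (List.replicate k c) = pieceB c k := by
  simp [pieceA, pieceB, getLastD_replicate c 'A' k hk]

theorem foldlA_eq (l : List Char) : ∀ (c : Char) (k : Nat) (ans : List Char), 1 ≤ k →
    (let fs := l.foldl stepA (List.replicate k c, ans);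
     if fs.1 = [] then fs.2 else fs.2 ++ pieceA fs.1) = ans ++ runB c k l := by
  induction l with
  | nil =>
    intro c k ans hk
    have hne : List.replicate k c ≠ [] := by simp; omega
    simp [runB, hne, pieceA_replicate c k hk]
  | cons x xs ih =>
    intro c k ans hk
    have hne : List.replicate k c ≠ [] := by simp; omega
    have hlast : (List.replicate k c).getLast?.getD 'A' = c := getLastD_replicate c 'A' k hk
    by_cases h : x = c
    · subst h
      have hstep : stepA (List.replicate k x, ans) x = (List.replicate (k + 1) x, ans) := by
        simp [stepA, hlast, List.replicate_succ' (n := k)]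
      simp only [List.foldl_cons, hstep]
      rw [ih x (k + 1) ans (by omega)]
      simp [runB]
    · have hstep : stepA (List.replicate k c, ans) x
          = (List.replicate 1 x, ans ++ pieceA (List.replicate k c)) := by
        have hx : ¬ (List.replicate k c).getLast?.getD 'A' = x := by
          rw [hlast]; exact fun e => h e.symm
        simp [stepA, hne, hx]
      simp only [List.foldl_cons, hstep]
      rw [ih x 1 _ (by omega)]
      simp [runB, h, pieceA_replicate c k hk, List.append_assoc]

-- ===== VERDICT (by name: the statement is the Claim_ definition above) =====
theorem decode_string_spec : Claim_equal_decode_string := by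
  intro st _
  unfold Spec_decode_string decode_string decode_string_alt
  cases hl : st.toList with
  | nil => simp [encodeRuns]
  | cons x xs =>
    have hstep : stepA ([], []) x = (List.replicate 1 x, []) := by simp [stepA]
    simp only [List.foldl_cons, hstep]
    have := foldlA_eq xs x 1 [] (by omega)
    simp only at this
    rw [this, runB_eq xs x 1, Nat.add_comm]
    simp [encodeRuns]
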